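-- pv_equiv track=rewrite | github.com/The-Obstacle-Is-The-Way/Novamind-Backend-ONLY-TWINS | backend/scripts/test/tools/indentation_fixer.py | _fix_unmatched_brace
-- ===== SOURCE A (Python) =====
-- from typing import Dict, List, Optional, Set, Tuple
--
-- def _fix_unmatched_brace(lines: List[str], line_idx: int) -> List[str]:
--     """Fix unmatched brace by counting and matching them."""
--     line = lines[line_idx]
--
--     # Count open and close braces
--     open_count = line.count('{')
--     close_count = line.count('}')
--
--     if close_count > open_count:
--         # Too many closing braces, remove extras
--         diff = close_count - open_count
--         for _ in range(diff):
--             pos = line.rfind('}')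
--             if pos >= 0:
--                 line = line[:pos] + line[pos+1:]
--
--         lines[line_idx] = line
--
--     return lines
-- ===== SOURCE B (Python) =====
-- def _fix_unmatched_brace(lines, line_idx):
--     """Fix unmatched brace: drop the rightmost extra closing braces in one pass."""
--     line = lines[line_idx]
--     diff = line.count('}') - line.count('{')
--     if diff > 0:
--         kept = []
--         for ch in reversed(line):
--             if diff > 0 and ch == '}':
--                 diff -= 1
--             else:
--                 kept.append(ch)
--         lines[line_idx] = ''.join(reversed(kept))
--     return lines
-- ===== Notes on version B (the rewrite author's own statement) =====
-- stated objective: simpler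
-- what changed: Replaces A's diff-times rfind-and-splice loop (each iteration rescans the string) with a single right-to-left pass that drops the first diff characters equal to '}' and keeps the rest.
import Mathlib
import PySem

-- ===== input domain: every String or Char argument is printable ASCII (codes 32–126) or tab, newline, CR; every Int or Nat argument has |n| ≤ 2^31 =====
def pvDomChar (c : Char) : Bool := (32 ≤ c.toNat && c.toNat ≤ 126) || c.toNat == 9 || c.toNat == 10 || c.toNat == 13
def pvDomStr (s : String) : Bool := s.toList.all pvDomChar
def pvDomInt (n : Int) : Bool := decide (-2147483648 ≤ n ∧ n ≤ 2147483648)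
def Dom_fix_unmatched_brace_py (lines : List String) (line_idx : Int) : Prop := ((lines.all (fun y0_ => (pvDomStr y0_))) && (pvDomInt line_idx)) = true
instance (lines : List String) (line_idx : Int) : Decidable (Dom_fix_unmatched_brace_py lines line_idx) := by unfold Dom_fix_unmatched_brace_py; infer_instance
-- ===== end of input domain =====

-- B removes the rightmost extra closing braces in ONE right-to-left pass instead of A's
-- repeated rfind-and-slice loop (objective: simpler; both mutate lines[line_idx] in place
-- in Python — the equivalence proved here is about the returned list, whose contents A and
-- B mutate identically).

-- ===== PORT A =====
-- body of A's 'for _ in range(diff)' loop: pos = line.rfind('}'); if pos >= 0: splice it out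
def pvStepA (line : String) : String :=
  let pos := PySem.Str.rfind line "}"
  if pos ≥ 0 then
    PySem.Str.slice line none (some pos) ++ PySem.Str.slice line (some (pos + 1)) none
  else line

def fix_unmatched_brace_py (lines : List String) (line_idx : Int) : List String :=
  match PySem.List.pyGet? lines line_idx with
  | none => []  -- lines[line_idx] raises IndexError in Python; excluded by Pre_
  | some line0 =>
    let open_count := PySem.Str.count line0 "{"
    let close_count := PySem.Str.count line0 "}"
    if close_count > open_count then
      let diff : Int := (close_count : Int) - (open_count : Int)
      let line := (PySem.List.pyRange 0 diff 1).foldl (fun line _ => pvStepA line) line0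
      PySem.List.pySetD lines line_idx line
    else lines

-- ===== PORT B =====
-- B's reversed() scan: drop the first k chars equal to '}', keep everything else
def pvSkipBraces : List Char → Nat → List Char
  | [], _ => []
  | c :: cs, k => if 0 < k ∧ c = '}' then pvSkipBraces cs (k - 1) else c :: pvSkipBraces cs k

def fix_unmatched_brace_py_alt (lines : List String) (line_idx : Int) : List String :=
  match PySem.List.pyGet? lines line_idx with
  | none => []  -- lines[line_idx] raises IndexError in Python; excluded by Pre_
  | some line =>
    let diff : Int := (PySem.Str.count line "}" : Int) - (PySem.Str.count line "{" : Int)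
    if 0 < diff then
      PySem.List.pySetD lines line_idx
        (String.ofList (pvSkipBraces line.toList.reverse diff.toNat).reverse)
    else lines

-- ===== PRECONDITION & SPEC =====
-- Pre_ excludes exactly the inputs where lines[line_idx] raises IndexError
def Pre_fix_unmatched_brace_py (lines : List String) (line_idx : Int) : Prop :=
  PySem.Raise.InRange lines.length line_idx
instance (lines : List String) (line_idx : Int) : Decidable (Pre_fix_unmatched_brace_py lines line_idx) := by unfold Pre_fix_unmatched_brace_py; infer_instance

def pvWitness_fix_unmatched_brace_py : List String × Int := (["a}}{"], 0)

def Spec_fix_unmatched_brace_py (lines : List String) (line_idx : Int) (out : List String) : Prop := out = fix_unmatched_brace_py_alt lines line_idx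
instance (lines : List String) (line_idx : Int) (out : List String) : Decidable (Spec_fix_unmatched_brace_py lines line_idx out) := by unfold Spec_fix_unmatched_brace_py; infer_instance

-- ===== CLAIM (what is proved, stated in full; the proofs are below) =====
def Claim_equal_fix_unmatched_brace_py : Prop := ∀ (lines : List String) (line_idx : Int), Dom_fix_unmatched_brace_py lines line_idx → Pre_fix_unmatched_brace_py lines line_idx → Spec_fix_unmatched_brace_py lines line_idx (fix_unmatched_brace_py lines line_idx)

-- ===== LEMMAS AND PROOFS =====

-- remove the first '}' (proof-side mirror of one A-step, seen from the reversed string)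
def pvDropFirstBrace : List Char → List Char
  | [] => []
  | c :: cs => if c = '}' then cs else c :: pvDropFirstBrace cs

theorem pvSkip_zero (l : List Char) : pvSkipBraces l 0 = l := by
  induction l with
  | nil => rfl
  | cons c cs ih => simp [pvSkipBraces, ih]

theorem pvSkip_succ (l : List Char) (k : Nat) :
    pvSkipBraces l (k + 1) = pvSkipBraces (pvDropFirstBrace l) k := by
  induction l generalizing k with
  | nil => rfl
  | cons c cs ih =>
    by_cases hc : c = '}'
    · simp [pvSkipBraces, pvDropFirstBrace, hc]
    · simp [pvSkipBraces, pvDropFirstBrace, hc, ih]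

theorem pvDropFirstBrace_append (a b : List Char) (ha : '}' ∉ a) :
    pvDropFirstBrace (a ++ '}' :: b) = a ++ b := by
  induction a with
  | nil => simp [pvDropFirstBrace]
  | cons c cs ih =>
    have hc : c ≠ '}' := fun h => ha (h ▸ List.mem_cons_self)
    simp only [List.cons_append, pvDropFirstBrace, if_neg hc]
    rw [ih (fun h => ha (List.mem_cons_of_mem _ h))]

-- c occurs in l → split off the LAST occurrence
theorem pvExists_last {c : Char} {l : List Char} (h : c ∈ l) :
    ∃ u v, l = u ++ c :: v ∧ c ∉ v := by
  induction l with
  | nil => cases h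
  | cons x xs ih =>
    by_cases hx : c ∈ xs
    · obtain ⟨u, v, rfl, hv⟩ := ih hx
      exact ⟨x :: u, v, rfl, hv⟩
    · have hxc : x = c := by
        rcases List.mem_cons.mp h with h' | h'
        · exact h'.symm
        · exact absurd h' hx
      exact ⟨[], xs, by simp [hxc], hx⟩

-- PySem.Chars.count with a single-char needle is List.count
theorem pvCount_go (c : Char) (l : List Char) (fuel acc : Nat) (hf : l.length ≤ fuel) :
    PySem.Chars.count.go [c] fuel l acc = acc + l.count c := by
  induction l generalizing fuel acc with
  | nil => cases fuel <;> simp [PySem.Chars.count.go]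
  | cons h t ih =>
    cases fuel with
    | zero => simp at hf
    | succ f =>
      have hf' : t.length ≤ f := by simpa using hf
      by_cases hc : h = c
      · simp [PySem.Chars.count.go, List.isPrefixOf, hc, ih _ _ hf']
        omega
      · have : (c == h) = false := by simp; exact fun h' => hc h'.symm
        simp [PySem.Chars.count.go, List.isPrefixOf, this, ih _ _ hf', hc]

theorem pvCount_singleton (c : Char) (l : List Char) :
    PySem.Chars.count l [c] = l.count c := by
  simp [PySem.Chars.count, pvCount_go c l l.length 0 le_rfl]

-- rfind.go returns k when the needle matches at k and nowhere in (k, j]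
theorem pvRfind_go_spec (l : List Char) (c : Char) (k j : Nat) (hk : k ≤ j)
    (hpos : [c].isPrefixOf (l.drop k))
    (hneg : ∀ i, k < i → i ≤ j → ¬ ([c].isPrefixOf (l.drop i) = true)) :
    PySem.Chars.rfind.go l [c] j = (k : Int) := by
  induction j with
  | zero =>
    have hk0 : k = 0 := Nat.le_zero.mp hk
    subst hk0
    simp only [List.drop_zero] at hpos
    simp [PySem.Chars.rfind.go, hpos]
  | succ j ih =>
    by_cases hj : [c].isPrefixOf (l.drop (j + 1)) = true
    · have hkj : k = j + 1 := by
        by_contra hne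
        exact hneg (j + 1) (by omega) le_rfl hj
      simp [PySem.Chars.rfind.go, hj, hkj]
    · have hkj : k ≤ j := by
        rcases Nat.lt_or_ge k (j + 1) with h' | h'
        · omega
        · have : k = j + 1 := by omega
          exact absurd (this ▸ hpos) (by simpa using hj)
      simp only [PySem.Chars.rfind.go, hj]
      exact ih hkj (fun i h1 h2 => hneg i h1 (by omega))

theorem pvRfind_last (u v : List Char) (hv : '}' ∉ v) :
    PySem.Chars.rfind (u ++ '}' :: v) ['}'] = (u.length : Int) := by
  unfold PySem.Chars.rfind
  apply pvRfind_go_spec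
  · simp
  · rw [List.drop_left]
    simp [List.isPrefixOf]
  · intro i h1 h2 hpre
    have hmem : '}' ∈ (u ++ '}' :: v).drop i := by
      have hp : ['}'] <+: (u ++ '}' :: v).drop i := by
        rwa [← List.isPrefixOf_iff_prefix]
      exact hp.subset (by simp)
    have heq : (u ++ '}' :: v).drop i = v.drop (i - u.length - 1) := by
      have h3 : u ++ '}' :: v = (u ++ ['}']) ++ v := by simp
      rw [h3, List.drop_append]
      have h4 : i - (u ++ ['}']).length = i - u.length - 1 := by simp; omega
      rw [h4, List.drop_eq_nil_of_le (by simp; omega), List.nil_append]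
    rw [heq] at hmem
    exact hv (List.mem_of_mem_drop hmem)

-- one A-step on a string that still contains '}': drop-last-brace, and the count drops by 1
theorem pvStepA_eq (s : String) (h : 0 < s.toList.count '}') :
    pvStepA s = String.ofList (pvDropFirstBrace s.toList.reverse).reverse ∧
      (pvStepA s).toList.count '}' = s.toList.count '}' - 1 := by
  obtain ⟨u, v, hl, hv⟩ := pvExists_last (List.count_pos_iff.mp h)
  have hbr : ("}" : String).toList = ['}'] := by decide
  have hrf : PySem.Str.rfind s "}" = (u.length : Int) := by
    rw [PySem.Str.rfind_eq, hbr, hl, pvRfind_last u v hv]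
  have hmain : (pvStepA s).toList = u ++ v := by
    unfold pvStepA
    rw [hrf, if_pos (by exact_mod_cast Int.natCast_nonneg u.length)]
    rw [String.toList_append, PySem.Str.toList_slice, PySem.Str.toList_slice,
      PySem.Chars.slice_eq_listSlice, PySem.Chars.slice_eq_listSlice]
    have hc : (u.length : Int) + 1 = ((u.length + 1 : Nat) : Int) := by push_cast; ring
    rw [hc, PySem.List.slice_to_natCast, PySem.List.slice_from_natCast, hl]
    rw [List.take_left]
    have h3 : u ++ '}' :: v = (u ++ ['}']) ++ v := by simp
    rw [h3, List.drop_left' (by simp)]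
  have hdfb : (pvDropFirstBrace s.toList.reverse).reverse = u ++ v := by
    rw [hl]
    have : (u ++ '}' :: v).reverse = v.reverse ++ '}' :: u.reverse := by simp
    rw [this, pvDropFirstBrace_append _ _ (by simpa using hv)]
    simp
  constructor
  · apply String.toList_inj.mp
    rw [hmain]
    simp [hdfb]
  · rw [hmain, hl]
    have hv0 : v.count '}' = 0 := List.count_eq_zero.mpr hv
    simp [hv0]

-- a foldl that ignores the elements is an iterate
theorem pvFoldl_const {α β : Type} (L : List α) (f : β → β) (init : β) :
    L.foldl (fun s _ => f s) init = f^[L.length] init := by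
  induction L generalizing init with
  | nil => rfl
  | cons x xs ih => simp [List.foldl, ih, Function.iterate_succ_apply]

-- n A-steps = B's single reversed pass dropping n closing braces
theorem pvIter_eq (n : Nat) (s : String) (h : n ≤ s.toList.count '}') :
    pvStepA^[n] s = String.ofList (pvSkipBraces s.toList.reverse n).reverse := by
  induction n generalizing s with
  | zero => simp [pvSkip_zero]
  | succ n ih =>
    have hpos : 0 < s.toList.count '}' := by omega
    obtain ⟨h1, h2⟩ := pvStepA_eq s hpos
    rw [Function.iterate_succ_apply, ih (pvStepA s) (by omega)]
    rw [h1]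
    simp [pvSkip_succ]

-- ===== VERDICT (by name: the statement is the Claim_ definition above) =====
theorem fix_unmatched_brace_py_spec : Claim_equal_fix_unmatched_brace_py := by
  intro lines line_idx hdom hpre
  unfold Spec_fix_unmatched_brace_py
  unfold Pre_fix_unmatched_brace_py at hpre
  unfold fix_unmatched_brace_py fix_unmatched_brace_py_alt
  obtain ⟨line0, hget⟩ : ∃ l0, PySem.List.pyGet? lines line_idx = some l0 := by
    rcases hg : PySem.List.pyGet? lines line_idx with _ | l0
    · exact absurd hpre (by rwa [← PySem.List.pyGet?_eq_none_iff])
    · exact ⟨l0, rfl⟩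
  rw [hget]
  simp only []
  set oc := PySem.Str.count line0 "{" with hoc
  set cc := PySem.Str.count line0 "}" with hcc
  by_cases hgt : cc > oc
  · rw [if_pos hgt, if_pos (by omega : (0 : Int) < (cc : Int) - (oc : Int))]
    congr 1
    have hn : ((cc : Int) - (oc : Int)) = ((cc - oc : Nat) : Int) := by omega
    rw [hn, PySem.List.pyRange_zero_natCast, pvFoldl_const, Int.toNat_natCast]
    have hcount : cc = line0.toList.count '}' := by
      rw [hcc, PySem.Str.count_eq]
      have hbr : ("}" : String).toList = ['}'] := by decide
      rw [hbr, pvCount_singleton]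
    rw [List.length_map, List.length_range]
    exact pvIter_eq (cc - oc) line0 (by omega)
  · rw [if_neg hgt, if_neg (by omega : ¬ (0 : Int) < (cc : Int) - (oc : Int))]
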